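-- pv_equiv track=rewrite | github.com/miliar/Code_Jam_Webscraper | solutions_python/Problem_201/37.py | solve
-- ===== SOURCE A (Python) =====
-- def solve(N, K):
--     N -= 1
--     m = N // 2
--     M = m + (N % 2)
--     if K == 1:
--         return M, m
--     if K % 2:
--         return solve(m, K // 2)
--     else:
--         return solve(M, K // 2)
-- ===== SOURCE B (Python) =====
-- def solve(N, K):
--     # Phase 1: decompose K into its low bits (least significant first),
--     # stopping before the leading 1-bit.
--     bits = []
--     while K > 1:
--         bits.append(K % 2)
--         K //= 2
--     # Phase 2: fold the bits over N: odd bit -> lower half, even bit -> upper half.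
--     for b in bits:
--         q, r = divmod(N - 1, 2)
--         N = q if b else q + r
--     q, r = divmod(N - 1, 2)
--     return q + r, q
-- ===== Notes on version B (the rewrite author's own statement) =====
-- stated objective: alternative
-- what changed: Replaces the tail recursion threading (N,K) with two flat phases: first extract K's low bits into a list, then fold the halving step over that bit list, finishing with one divmod.
import Mathlib
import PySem

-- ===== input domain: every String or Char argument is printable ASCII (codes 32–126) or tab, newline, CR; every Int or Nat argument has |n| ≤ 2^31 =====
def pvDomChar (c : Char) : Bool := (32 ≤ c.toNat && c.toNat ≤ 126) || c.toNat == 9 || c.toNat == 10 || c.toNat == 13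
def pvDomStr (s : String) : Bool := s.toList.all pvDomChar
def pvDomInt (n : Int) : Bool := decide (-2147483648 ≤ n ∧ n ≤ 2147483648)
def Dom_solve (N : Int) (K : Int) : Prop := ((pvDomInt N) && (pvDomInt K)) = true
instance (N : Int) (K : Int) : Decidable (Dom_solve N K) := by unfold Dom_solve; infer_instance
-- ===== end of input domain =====

-- B replaces A's tail recursion by two flat phases (extract K's low bits, then fold the
-- halving step over them); same values, same cost (objective: alternative).

-- ===== PORT A =====
-- Fuel (K.toNat) only makes the recursion total; under Pre_solve it never runs out.
def solveA : Nat → Int → Int → Int × Int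
  | 0, _, _ => (0, 0)
  | fuel + 1, N, K =>
    let N' := N - 1
    let m := PySem.Int.floordiv N' 2
    let M := m + PySem.Int.mod N' 2
    if K = 1 then (M, m)
    else if PySem.Int.mod K 2 ≠ 0 then solveA fuel m (PySem.Int.floordiv K 2)
    else solveA fuel M (PySem.Int.floordiv K 2)

def solve (N : Int) (K : Int) : Int × Int := solveA K.toNat N K

-- ===== PORT B =====
-- Phase 1: the low bits of K, least significant first (fuel only for totality).
def solveBits : Nat → Int → List Int
  | 0, _ => []
  | fuel + 1, K =>
    if K > 1 then PySem.Int.mod K 2 :: solveBits fuel (PySem.Int.floordiv K 2) else []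

def solveStep (N : Int) (b : Int) : Int :=
  let q := PySem.Int.floordiv (N - 1) 2
  let r := PySem.Int.mod (N - 1) 2
  if b ≠ 0 then q else q + r

def solveFinish (N : Int) : Int × Int :=
  let q := PySem.Int.floordiv (N - 1) 2
  let r := PySem.Int.mod (N - 1) 2
  (q + r, q)

def solve_alt (N : Int) (K : Int) : Int × Int :=
  solveFinish (List.foldl solveStep N (solveBits K.toNat K))

-- ===== PRECONDITION & SPEC =====
-- Pre_ excludes K ≤ 0, on which the Python A recurses forever (RecursionError).
def Pre_solve (N : Int) (K : Int) : Prop := 1 ≤ K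
instance (N : Int) (K : Int) : Decidable (Pre_solve N K) := by unfold Pre_solve; infer_instance
def pvWitness_solve : Int × Int := (10, 3)

def Spec_solve (N : Int) (K : Int) (out : Int × Int) : Prop := out = solve_alt N K
instance (N : Int) (K : Int) (out : Int × Int) : Decidable (Spec_solve N K out) := by unfold Spec_solve; infer_instance

-- ===== CLAIM (what is proved, stated in full; the proofs are below) =====
def Claim_equal_solve : Prop := ∀ (N : Int) (K : Int), Dom_solve N K → Pre_solve N K → Spec_solve N K (solve N K)

-- ===== LEMMAS AND PROOFS =====

lemma solveA_eq_bits : ∀ (fuel : Nat) (N K : Int), 1 ≤ K → K.toNat ≤ fuel →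
    solveA fuel N K = solveFinish (List.foldl solveStep N (solveBits fuel K)) := by
  intro fuel
  induction fuel with
  | zero => intro N K hK hf; omega
  | succ f ih =>
    intro N K hK hf
    by_cases h1 : K = 1
    · subst h1
      simp [solveA, solveBits, solveFinish]
    · have hK2 : 2 ≤ K := by omega
      have hgt : K > 1 := by omega
      have hdiv : PySem.Int.floordiv K 2 = K / 2 :=
        PySem.Int.floordiv_eq_ediv_of_pos (by omega)
      have hmod : PySem.Int.mod K 2 = K % 2 :=
        PySem.Int.mod_eq_emod_of_pos (by omega)
      have h1le : 1 ≤ K / 2 := by omega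
      have hlt : (K / 2).toNat ≤ f := by omega
      rw [show solveBits (f+1) K = PySem.Int.mod K 2 :: solveBits f (PySem.Int.floordiv K 2) from by
        simp [solveBits, hgt]]
      simp only [List.foldl_cons]
      by_cases hodd : PySem.Int.mod K 2 ≠ 0
      · rw [show solveA (f+1) N K =
            solveA f (PySem.Int.floordiv (N-1) 2) (PySem.Int.floordiv K 2) from by
          rw [solveA]; simp only [if_neg h1, if_pos hodd]]
        rw [ih _ _ (hdiv ▸ h1le) (hdiv ▸ hlt)]
        congr 2
        rw [solveStep]; simp only [if_pos hodd]
      · rw [show solveA (f+1) N K =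
            solveA f (PySem.Int.floordiv (N-1) 2 + PySem.Int.mod (N-1) 2) (PySem.Int.floordiv K 2) from by
          rw [solveA]; simp only [if_neg h1, if_neg hodd]]
        rw [ih _ _ (hdiv ▸ h1le) (hdiv ▸ hlt)]
        congr 2
        rw [solveStep]; simp only [if_neg hodd]

-- ===== VERDICT (by name: the statement is the Claim_ definition above) =====
theorem solve_spec : Claim_equal_solve := by
  intro N K _ hPre
  unfold Spec_solve solve solve_alt
  exact solveA_eq_bits K.toNat N K hPre le_rfl
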